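-- pv_equiv track=rewrite | github.com/jcausse/clases_uca_ig | unidad_6/Teoria/algoritmos_dict.py | contar_marcas
-- ===== SOURCE A (Python) =====
-- def obtener_marca(s):       # Esta función separa el string por sus espacios, y devuelve la primera
--     return s.split()[0]     # palabra que contiene el mismo.
--
-- def contar_marcas(lst):
--     """
--     Recibe una lista de strings, los agrupa según el criterio indicado, y devuelve un diccionario donde las claves son
--     las marcas (el criterio), y los valores son la cantidad de apariciones de cada marca.
--     """
--     di = {}                 # Lo primero que hacemos es inicializar un diccionario vacío para poder contar las ocurrencias.
--                             # Las keys serán las marcas, y los values, la cantidad de apariciones.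
--     for s in lst:                       # Para cada string en la lista
--         marca = obtener_marca(s)        # Extraemos la marca (que es el criterio por el cual se agrupan los elementos).
--
--         # Y AHORA VIENE LA PARTE CLAVE: Como las keys en un diccionario son únicas, si encontramos una marca que NO esté
--         # actualmente en el diccionario, la agregamos al mismo con un valor de 1 (porque encontramos en la lista 1 auto de
--         # esa marca hasta el momento).
--         # Ahora bien, si la marca ya se encuentra en el diccionario, es porque anteriormente ya encontramos autos de dicha marca.
--         # En ese caso, simplemente incrementamos en 1 el valor para esa key (indicando que encontramos 1 auto más de esa marca).
--
--         if marca not in di:             # Si la marca NO está en el diccionario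
--             di[marca] = 1               # Agregamos la marca
--         else:                           # Si la marca ya estaba en el diccionario
--             di[marca] += 1              # Le sumamos una aparición
--
--     return di                           # Retornamos el diccionario
-- ===== SOURCE B (Python) =====
-- def contar_marcas(lst):
--     # Take the first word of every string, then map each brand to how many
--     # times it appears in that list.
--     brands = [s.split()[0] for s in lst]
--     return {b: brands.count(b) for b in brands}
-- ===== Notes on version B (the rewrite author's own statement) =====
-- stated objective: simpler
-- what changed: B materialises the list of first words once and builds the result as a dict comprehension mapping each brand to brands.count(b), instead of A's per-element membership test and running increment of a counter dict; Pre_ excludes lists containing an empty/whitespace-only string, on which both raise IndexError.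
import Mathlib
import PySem

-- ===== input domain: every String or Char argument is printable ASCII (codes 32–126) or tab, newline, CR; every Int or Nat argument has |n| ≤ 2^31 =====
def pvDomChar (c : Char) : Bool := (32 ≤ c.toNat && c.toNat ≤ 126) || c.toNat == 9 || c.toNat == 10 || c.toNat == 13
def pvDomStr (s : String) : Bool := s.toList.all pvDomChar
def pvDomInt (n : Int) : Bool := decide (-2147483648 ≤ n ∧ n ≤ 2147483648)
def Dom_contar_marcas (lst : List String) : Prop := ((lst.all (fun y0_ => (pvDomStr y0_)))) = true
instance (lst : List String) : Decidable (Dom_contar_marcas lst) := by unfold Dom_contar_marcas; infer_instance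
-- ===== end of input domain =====

-- B materialises the list of first words once and maps each brand to its count in that list (a dict comprehension), a simpler decomposition than A's running counter; return-value equivalence only.


-- ===== PORT A =====
-- s.split()[0]; pyGetD is exact under Pre_ (split₀ s nonempty; Python raises IndexError otherwise)
def obtener_marca (s : String) : String :=
  PySem.List.pyGetD (PySem.Str.split₀ s) 0 ""

def contar_marcas (lst : List String) : List (String × Int) :=
  (lst.foldl (fun di s =>
      let marca := obtener_marca s
      if di.contains marca = false then di.insert marca (1 : Int)
      else di.insert marca (di.getD marca 0 + 1))
    PySem.Dict.empty).items

-- ===== PORT B =====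
-- brands = [s.split()[0] for s in lst]; {b: brands.count(b) for b in brands}
-- (a dict comprehension is a fold of overwriting inserts in iteration order)
def contar_marcas_alt (lst : List String) : List (String × Int) :=
  let brands := lst.map (fun s => PySem.List.pyGetD (PySem.Str.split₀ s) 0 "")
  (brands.foldl (fun di b => di.insert b (brands.count b : Int)) PySem.Dict.empty).items

-- ===== PRECONDITION & SPEC =====
-- Pre_ excludes exactly the lists containing an empty/whitespace-only string, on which both Pythons raise IndexError.
def Pre_contar_marcas (lst : List String) : Prop := ∀ s ∈ lst, PySem.Str.split₀ s ≠ []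
instance (lst : List String) : Decidable (Pre_contar_marcas lst) := by unfold Pre_contar_marcas; infer_instance
def pvWitness_contar_marcas : List String := ["ford fiesta", "audi a4", "ford ka"]

def Spec_contar_marcas (lst : List String) (out : List (String × Int)) : Prop := out = contar_marcas_alt lst
instance (lst : List String) (out : List (String × Int)) : Decidable (Spec_contar_marcas lst out) := by unfold Spec_contar_marcas; infer_instance

-- ===== CLAIM (what is proved, stated in full; the proofs are below) =====
def Claim_equal_contar_marcas : Prop := ∀ (lst : List String), Dom_contar_marcas lst → Pre_contar_marcas lst → Spec_contar_marcas lst (contar_marcas lst)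

-- ===== LEMMAS AND PROOFS =====

-- A's two branches are one insert of getD+1
theorem pv_stepA_eq (di : PySem.Dict String Int) (m : String) :
    (if di.contains m = false then di.insert m (1 : Int) else di.insert m (di.getD m 0 + 1))
    = di.insert m (di.getD m 0 + 1) := by
  by_cases h : di.contains m = false
  · rw [if_pos h, PySem.Dict.getD_of_not_contains di 0 h, zero_add]
  · rw [if_neg h]

theorem pv_A_eq_counter (lst : List String) :
    contar_marcas lst = (PySem.Dict.counter (lst.map obtener_marca)).items := by
  unfold contar_marcas
  have h1 : (lst.foldl (fun di s =>
      let marca := obtener_marca s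
      if di.contains marca = false then di.insert marca (1 : Int)
      else di.insert marca (di.getD marca 0 + 1)) PySem.Dict.empty)
      = (lst.map obtener_marca).foldl (fun d x => d.insert x (d.getD x 0 + 1)) PySem.Dict.empty := by
    rw [List.foldl_map]
    have hf : (fun (di : PySem.Dict String Int) (s : String) =>
        let marca := obtener_marca s
        if di.contains marca = false then di.insert marca (1 : Int)
        else di.insert marca (di.getD marca 0 + 1))
        = fun di s => di.insert (obtener_marca s) (di.getD (obtener_marca s) 0 + 1) :=
      funext fun di => funext fun s => pv_stepA_eq di (obtener_marca s)
    rw [hf]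
  rw [h1, PySem.Dict.foldl_insert_getD_add_one_eq_counter]

-- value reached by a fold of inserts of a fixed function of the key
theorem pv_getD_foldl_insert_const (g : String → Int) (l : List String)
    (d : PySem.Dict String Int) (k : String) :
    (l.foldl (fun di b => di.insert b (g b)) d).getD k 0
      = if k ∈ l then g k else d.getD k 0 := by
  induction l generalizing d with
  | nil => simp
  | cons b l ih =>
    rw [List.foldl_cons, ih]
    by_cases hl : k ∈ l
    · simp [hl]
    · rw [PySem.Dict.getD_insert]
      by_cases hk : k = b <;> simp [hk, hl]

-- the comprehension's dict: one item per distinct brand, paired through g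
theorem pv_B_items (g : String → Int) (brands : List String) :
    (brands.foldl (fun di b => di.insert b (g b)) PySem.Dict.empty).items
      = (PySem.Set.ofList brands).map (fun k => (k, g k)) := by
  set d := brands.foldl (fun di b => di.insert b (g b)) PySem.Dict.empty with hd
  have hkeys : d.keys = PySem.Set.ofList brands := by
    rw [hd, PySem.Dict.keys_foldl_insert]
    simp [PySem.Dict.empty, PySem.Dict.keys, PySem.Set.update_nil_left]
  have hnd : d.keys.Nodup := by rw [hkeys]; exact PySem.Set.nodup_ofList brands
  rw [PySem.Dict.items_eq_map_keys d hnd 0, hkeys]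
  apply List.map_congr_left
  intro k hk
  have hkmem : k ∈ brands := (PySem.Set.mem_ofList brands k).1 hk
  rw [hd, pv_getD_foldl_insert_const, if_pos hkmem]

-- ===== VERDICT (by name: the statement is the Claim_ definition above) =====
theorem contar_marcas_spec : Claim_equal_contar_marcas := by
  intro lst _ _
  unfold Spec_contar_marcas
  simp only [contar_marcas_alt]
  rw [pv_A_eq_counter lst, PySem.Dict.items_counter, pv_B_items]
  rfl
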